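-- pv_equiv track=rewrite | github.com/TanQinYang/Image-Manipulation | hw07files/hw07.py | rotate_quadrants
-- ===== SOURCE A (Python) =====
-- def rotate_quadrants(img_matrix):
--     '''
--     Purpose:
--       Split the image into four equally sized quadrants, and rotate
--       them clockwise to form the output image.
--     Input Parameter(s):
--       (see grayscale) - plus, it can be assumed the img_matrix will have
--       an even number of rows and columns.
--     Return Value:
--       A 3D matrix of the same dimensions as img_matrix,
--       with changes as described in the purpose section.
--     '''
--     #TODO: Fix the logic error in the code
--     height = len(img_matrix)
--     width = len(img_matrix[0])
--     for y in range(height//2):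
--         for x in range(width//2):
--             temp=img_matrix[y][x]
--             img_matrix[y][x] = img_matrix[y+height//2][x]
--             img_matrix[y+height//2][x] = img_matrix[y+height//2][x+width//2]
--             img_matrix[y+height//2][x+width//2] = img_matrix[y][x+width//2]
--             img_matrix[y][x+width//2] = temp
--     return img_matrix
-- ===== SOURCE B (Python) =====
-- def rotate_quadrants(img_matrix):
--     h2 = len(img_matrix) // 2
--     w2 = len(img_matrix[0]) // 2
--     for y in range(h2):
--         top, bot = img_matrix[y], img_matrix[y + h2]
--         t, b = top[:2 * w2], bot[:2 * w2]
--         top[:2 * w2] = b[:w2] + t[:w2]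
--         bot[:2 * w2] = b[w2:] + t[w2:]
--     return img_matrix
-- ===== Notes on version B (the rewrite author's own statement) =====
-- stated objective: simpler
-- what changed: Replaces A's nested per-cell loops doing a temp-based 4-cycle of element swaps with a single loop over row pairs that reassembles each top/bottom row from half-row slices (top := bot-left + top-left, bot := bot-right + top-right) via slice assignment.
import Mathlib
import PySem

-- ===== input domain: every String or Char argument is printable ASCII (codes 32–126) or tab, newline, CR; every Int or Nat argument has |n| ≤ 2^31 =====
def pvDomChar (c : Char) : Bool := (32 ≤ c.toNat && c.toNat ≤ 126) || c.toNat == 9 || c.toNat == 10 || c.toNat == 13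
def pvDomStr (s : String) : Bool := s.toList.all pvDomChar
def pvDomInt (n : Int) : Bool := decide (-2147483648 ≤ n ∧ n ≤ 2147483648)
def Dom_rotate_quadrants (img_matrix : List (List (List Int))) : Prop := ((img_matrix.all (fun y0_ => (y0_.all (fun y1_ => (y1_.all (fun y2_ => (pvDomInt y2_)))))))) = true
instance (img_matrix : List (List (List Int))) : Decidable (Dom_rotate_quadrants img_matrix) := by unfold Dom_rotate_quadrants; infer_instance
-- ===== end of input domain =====

-- B replaces A's nested per-cell loops (temp-based 4-cycle of element swaps) by a single loop
-- over row pairs that reassembles each top/bottom row from half-row slices via slice assignment.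
-- Both Pythons mutate img_matrix in place in the same way and return it; the equivalence proved
-- here is about the return value.

-- ===== PORT A =====
-- Python read `m[y][x]` (indices here are always nonnegative ints)
def pvGet2 (m : List (List (List Int))) (y x : Nat) : List Int :=
  (m.getD y []).getD x []

-- Python in-place write `m[y][x] = v`, as a functional update of the nested list
def pvSet2 (m : List (List (List Int))) (y x : Nat) (v : List Int) : List (List (List Int)) :=
  m.set y ((m.getD y []).set x v)

-- body of A's inner loop: the temp-based 4-cycle, every read from the CURRENT matrix
def pvStepA (h2 w2 : Nat) (m : List (List (List Int))) (y x : Nat) : List (List (List Int)) :=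
  let temp := pvGet2 m y x
  let m1 := pvSet2 m y x (pvGet2 m (y + h2) x)
  let m2 := pvSet2 m1 (y + h2) x (pvGet2 m1 (y + h2) (x + w2))
  let m3 := pvSet2 m2 (y + h2) (x + w2) (pvGet2 m2 y (x + w2))
  pvSet2 m3 y (x + w2) temp

def rotate_quadrants (img_matrix : List (List (List Int))) : List (List (List Int)) :=
  let height := img_matrix.length
  let width := (img_matrix.headD []).length
  (List.range (height / 2)).foldl
    (fun m y =>
      (List.range (width / 2)).foldl (fun m x => pvStepA (height / 2) (width / 2) m y x) m)
    img_matrix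

-- ===== PORT B =====
-- body of B's loop over y: read rows y and y+h2, snapshot their first 2*w2 entries
-- (Python slices with nonnegative bounds = take/drop, exact), and reassemble both rows
-- from the four half-row slices (slice assignment `top[:2*w2] = …` keeps the tail)
def pvStepBRow (h2 w2 : Nat) (m : List (List (List Int))) (y : Nat) : List (List (List Int)) :=
  let top := m.getD y []
  let bot := m.getD (y + h2) []
  let t := top.take (2 * w2)
  let b := bot.take (2 * w2)
  let m1 := m.set y (b.take w2 ++ t.take w2 ++ top.drop (2 * w2))
  m1.set (y + h2) (b.drop w2 ++ t.drop w2 ++ bot.drop (2 * w2))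

def rotate_quadrants_alt (img_matrix : List (List (List Int))) : List (List (List Int)) :=
  let h2 := img_matrix.length / 2
  let w2 := (img_matrix.headD []).length / 2
  (List.range h2).foldl (fun m y => pvStepBRow h2 w2 m y) img_matrix

-- ===== PRECONDITION & SPEC =====
-- Pre_ excludes exactly the inputs where Python A raises IndexError: the empty matrix
-- (img_matrix[0]) and matrices with a touched row too short for the column indices used.
def Pre_rotate_quadrants (img_matrix : List (List (List Int))) : Prop :=
  img_matrix ≠ [] ∧
    ∀ i < 2 * (img_matrix.length / 2),
      2 * ((img_matrix.headD []).length / 2) ≤ (img_matrix.getD i []).length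

instance (img_matrix : List (List (List Int))) : Decidable (Pre_rotate_quadrants img_matrix) := by
  unfold Pre_rotate_quadrants; infer_instance

def pvWitness_rotate_quadrants : List (List (List Int)) :=
  [[[1], [2]], [[3], [4]]]

def Spec_rotate_quadrants (img_matrix : List (List (List Int))) (out : List (List (List Int))) : Prop := out = rotate_quadrants_alt img_matrix
instance (img_matrix : List (List (List Int))) (out : List (List (List Int))) : Decidable (Spec_rotate_quadrants img_matrix out) := by unfold Spec_rotate_quadrants; infer_instance

-- ===== CLAIM (what is proved, stated in full; the proofs are below) =====
def Claim_equal_rotate_quadrants : Prop := ∀ (img_matrix : List (List (List Int))), Dom_rotate_quadrants img_matrix → Pre_rotate_quadrants img_matrix → Spec_rotate_quadrants img_matrix (rotate_quadrants img_matrix)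

-- ===== LEMMAS AND PROOFS =====

-- generic list utilities
theorem pv_set_mid {α : Type} (p q : List α) (a v : α) (i : Nat) (h : p.length = i) :
    (p ++ a :: q).set i v = p ++ v :: q := by
  subst h
  induction p with
  | nil => rfl
  | cons x p ih => simp

theorem pv_getD_mid {α : Type} (p q : List α) (a d : α) (i : Nat) (h : p.length = i) :
    (p ++ a :: q).getD i d = a := by
  subst h
  induction p with
  | nil => rfl
  | cons x p ih => simp

theorem pv_getD_set_ne {α : Type} (l : List α) (i j : Nat) (a d : α) (h : i ≠ j) :
    (l.set i a).getD j d = l.getD j d := by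
  simp [List.getD_eq_getElem?_getD, List.getElem?_set_ne h]

theorem pv_set_self {α : Type} (l : List α) (i : Nat) (d : α) (h : i < l.length) :
    l.set i (l.getD i d) = l := by
  rw [List.getD_eq_getElem _ _ h]
  exact List.set_getElem_self h

theorem pv_drop_cons {α : Type} (l : List α) (i : Nat) (d : α) (h : i < l.length) :
    l.drop i = l.getD i d :: l.drop (i + 1) := by
  rw [List.getD_eq_getElem _ _ h]
  exact List.drop_eq_getElem_cons h

-- row shapes after k inner iterations of A on the row pair (T, B)
def rowT (T B : List (List Int)) (w2 k : Nat) : List (List Int) :=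
  B.take k ++ (T.drop k).take (w2 - k) ++ T.take k ++ T.drop (k + w2)

def rowB (T B : List (List Int)) (w2 k : Nat) : List (List Int) :=
  (B.drop w2).take k ++ (B.drop k).take (w2 - k) ++ (T.drop w2).take k ++ B.drop (k + w2)

theorem rowT_zero (T B : List (List Int)) (w2 : Nat) : rowT T B w2 0 = T := by
  simp [rowT]

theorem rowB_zero (T B : List (List Int)) (w2 : Nat) : rowB T B w2 0 = B := by
  simp [rowB]

theorem pv_getD_set_self {α : Type} (l : List α) (i : Nat) (a d : α) (h : i < l.length) :
    (l.set i a).getD i d = a := by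
  simp [List.getD_eq_getElem?_getD, List.getElem?_set_self h]

theorem pv_getD_drop {α : Type} (l : List α) (n i : Nat) (d : α) :
    (l.drop n).getD i d = l.getD (n + i) d := by
  simp [List.getD_eq_getElem?_getD, List.getElem?_drop]

theorem pv_take_succ {α : Type} (l : List α) (n : Nat) (d : α) (h : n < l.length) :
    l.take (n + 1) = l.take n ++ [l.getD n d] := by
  rw [List.take_add_one, List.getElem?_eq_getElem h, List.getD_eq_getElem _ _ h]
  rfl

-- expose the element at index k of rowT/rowB as a cons
theorem rowT_decomp (T B : List (List Int)) (w2 k : Nat) (hk : k < w2) (hT : 2 * w2 ≤ T.length) :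
    rowT T B w2 k =
      B.take k ++ T.getD k [] ::
        ((T.drop (k+1)).take (w2 - (k+1)) ++ T.take k ++ T.getD (k+w2) [] :: T.drop (k+w2+1)) := by
  unfold rowT
  rw [pv_drop_cons T k [] (by omega), pv_drop_cons T (k+w2) [] (by omega)]
  have hwk : w2 - k = (w2 - (k+1)) + 1 := by omega
  rw [hwk, List.take_succ_cons]
  simp

theorem rowB_decomp (T B : List (List Int)) (w2 k : Nat) (hk : k < w2) (hB : 2 * w2 ≤ B.length) :
    rowB T B w2 k =
      (B.drop w2).take k ++ B.getD k [] ::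
        ((B.drop (k+1)).take (w2 - (k+1)) ++ (T.drop w2).take k ++ B.getD (k+w2) [] :: B.drop (k+w2+1)) := by
  unfold rowB
  rw [pv_drop_cons B k [] (by omega), pv_drop_cons B (k+w2) [] (by omega)]
  have hwk : w2 - k = (w2 - (k+1)) + 1 := by omega
  rw [hwk, List.take_succ_cons]
  simp

-- expose the element at index k+w2 of rowT/rowB as a cons
theorem rowT_decomp2 (T B : List (List Int)) (w2 k : Nat) (hk : k < w2) (hT : 2 * w2 ≤ T.length) :
    rowT T B w2 k =
      (B.take k ++ (T.drop k).take (w2 - k) ++ T.take k) ++ T.getD (k+w2) [] :: T.drop (k+w2+1) := by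
  unfold rowT
  rw [pv_drop_cons T (k+w2) [] (by omega)]

theorem rowB_decomp2 (T B : List (List Int)) (w2 k : Nat) (hk : k < w2)
    (hB : 2 * w2 ≤ B.length) :
    rowB T B w2 k =
      ((B.drop w2).take k ++ (B.drop k).take (w2 - k) ++ (T.drop w2).take k) ++
        B.getD (k+w2) [] :: B.drop (k+w2+1) := by
  unfold rowB
  rw [pv_drop_cons B (k+w2) [] (by omega)]

-- element reads from the shaped rows
theorem rowT_get_lo (T B : List (List Int)) (w2 k : Nat) (hk : k < w2)
    (hT : 2 * w2 ≤ T.length) (hB : 2 * w2 ≤ B.length) :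
    (rowT T B w2 k).getD k [] = T.getD k [] := by
  rw [rowT_decomp T B w2 k hk hT]
  exact pv_getD_mid _ _ _ _ _ (by simp; omega)

theorem rowT_get_hi (T B : List (List Int)) (w2 k : Nat) (hk : k < w2)
    (hT : 2 * w2 ≤ T.length) (hB : 2 * w2 ≤ B.length) :
    (rowT T B w2 k).getD (k+w2) [] = T.getD (k+w2) [] := by
  rw [rowT_decomp2 T B w2 k hk hT]
  exact pv_getD_mid _ _ _ _ _ (by simp; omega)

theorem rowB_get_lo (T B : List (List Int)) (w2 k : Nat) (hk : k < w2)
    (hB : 2 * w2 ≤ B.length) :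
    (rowB T B w2 k).getD k [] = B.getD k [] := by
  rw [rowB_decomp T B w2 k hk hB]
  exact pv_getD_mid _ _ _ _ _ (by simp; omega)

theorem rowB_get_hi (T B : List (List Int)) (w2 k : Nat) (hk : k < w2)
    (hT : 2 * w2 ≤ T.length) (hB : 2 * w2 ≤ B.length) :
    (rowB T B w2 k).getD (k+w2) [] = B.getD (k+w2) [] := by
  rw [rowB_decomp2 T B w2 k hk hB]
  exact pv_getD_mid _ _ _ _ _ (by simp; omega)

-- writing the two cells of column k advances the row shape by one column
theorem rowT_succ (T B : List (List Int)) (w2 k : Nat) (hk : k < w2)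
    (hT : 2 * w2 ≤ T.length) (hB : 2 * w2 ≤ B.length) :
    ((rowT T B w2 k).set k (B.getD k [])).set (k+w2) (T.getD k []) = rowT T B w2 (k+1) := by
  rw [rowT_decomp T B w2 k hk hT]
  rw [pv_set_mid _ _ _ _ _ (by simp; omega)]
  have e : B.take k ++ B.getD k [] ::
      ((T.drop (k+1)).take (w2 - (k+1)) ++ T.take k ++ T.getD (k+w2) [] :: T.drop (k+w2+1))
      = (B.take k ++ B.getD k [] :: ((T.drop (k+1)).take (w2 - (k+1)) ++ T.take k)) ++
          T.getD (k+w2) [] :: T.drop (k+w2+1) := by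
    simp
  rw [e, pv_set_mid _ _ _ _ _ (by simp; omega)]
  unfold rowT
  rw [pv_take_succ B k [] (by omega), pv_take_succ T k [] (by omega)]
  have e2 : k + 1 + w2 = k + w2 + 1 := by omega
  rw [e2]
  simp

theorem rowB_succ (T B : List (List Int)) (w2 k : Nat) (hk : k < w2)
    (hT : 2 * w2 ≤ T.length) (hB : 2 * w2 ≤ B.length) :
    ((rowB T B w2 k).set k (B.getD (k+w2) [])).set (k+w2) (T.getD (k+w2) [])
      = rowB T B w2 (k+1) := by
  rw [rowB_decomp T B w2 k hk hB]
  rw [pv_set_mid _ _ _ _ _ (by simp; omega)]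
  have e : (B.drop w2).take k ++ B.getD (k+w2) [] ::
      ((B.drop (k+1)).take (w2 - (k+1)) ++ (T.drop w2).take k ++ B.getD (k+w2) [] :: B.drop (k+w2+1))
      = ((B.drop w2).take k ++ B.getD (k+w2) [] ::
          ((B.drop (k+1)).take (w2 - (k+1)) ++ (T.drop w2).take k)) ++
          B.getD (k+w2) [] :: B.drop (k+w2+1) := by
    simp
  rw [e, pv_set_mid _ _ _ _ _ (by simp; omega)]
  unfold rowB
  rw [pv_take_succ (B.drop w2) k [] (by simp; omega),
      pv_take_succ (T.drop w2) k [] (by simp; omega)]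
  have e2 : k + 1 + w2 = k + w2 + 1 := by omega
  rw [e2, pv_getD_drop B w2 k, pv_getD_drop T w2 k]
  have e3 : w2 + k = k + w2 := by omega
  rw [e3]
  simp

-- set/set normalisation on the matrix
theorem pv_set_top {α : Type} (m : List α) (y y' : Nat) (a b c : α) (h : y ≠ y') :
    ((m.set y a).set y' b).set y c = (m.set y c).set y' b := by
  rw [List.set_comm b c (Ne.symm h), List.set_set]

-- the core step: one iteration of A's inner loop advances the row-pair shape by one column
theorem pv_stepA_shape (m : List (List (List Int))) (y h2 w2 k : Nat)
    (T B : List (List Int)) (hh : h2 ≠ 0) (hk : k < w2) (hyb : y + h2 < m.length)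
    (hT : 2 * w2 ≤ T.length) (hB : 2 * w2 ≤ B.length) :
    pvStepA h2 w2 ((m.set y (rowT T B w2 k)).set (y+h2) (rowB T B w2 k)) y k
      = (m.set y (rowT T B w2 (k+1))).set (y+h2) (rowB T B w2 (k+1)) := by
  have hy : y < m.length := by omega
  have hne : y ≠ y + h2 := by omega
  have lemTop : ∀ (a b : List (List Int)),
      ((m.set y a).set (y+h2) b).getD y [] = a := by
    intro a b
    rw [pv_getD_set_ne _ _ _ _ _ (Ne.symm hne), pv_getD_set_self _ _ _ _ hy]
  have lemBot : ∀ (a b : List (List Int)),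
      ((m.set y a).set (y+h2) b).getD (y+h2) [] = b := by
    intro a b
    exact pv_getD_set_self _ _ _ _ (by simpa using hyb)
  have lemSetTop : ∀ (a b c : List (List Int)),
      ((m.set y a).set (y+h2) b).set y c = (m.set y c).set (y+h2) b :=
    fun a b c => pv_set_top m y (y+h2) a b c hne
  have lemSetBot : ∀ (a b c : List (List Int)),
      ((m.set y a).set (y+h2) b).set (y+h2) c = (m.set y a).set (y+h2) c :=
    by intro a b c; rw [List.set_set]
  have hrowT_ne : ∀ (v : List Int),
      ((rowT T B w2 k).set k v).getD (k+w2) [] = (rowT T B w2 k).getD (k+w2) [] :=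
    fun v => pv_getD_set_ne _ _ _ _ _ (by omega)
  have hrowB_ne : ∀ (v : List Int),
      ((rowB T B w2 k).set k v).getD (k+w2) [] = (rowB T B w2 k).getD (k+w2) [] :=
    fun v => pv_getD_set_ne _ _ _ _ _ (by omega)
  simp only [pvStepA, pvGet2, pvSet2, lemTop, lemBot, lemSetTop, lemSetBot,
    hrowT_ne,
    rowT_get_lo T B w2 k hk hT hB, rowT_get_hi T B w2 k hk hT hB,
    rowB_get_lo T B w2 k hk hB, rowB_get_hi T B w2 k hk hT hB]
  rw [rowT_succ T B w2 k hk hT hB, rowB_succ T B w2 k hk hT hB]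

-- inner loop of A equals B's row step
theorem pv_inner_aux (m : List (List (List Int))) (y h2 w2 : Nat)
    (T B : List (List Int)) (hh : h2 ≠ 0) (hyb : y + h2 < m.length)
    (hT : 2 * w2 ≤ T.length) (hB : 2 * w2 ≤ B.length) :
    ∀ (n k : Nat), k + n = w2 →
      (List.range' k n).foldl (fun m x => pvStepA h2 w2 m y x)
          ((m.set y (rowT T B w2 k)).set (y+h2) (rowB T B w2 k))
        = (m.set y (rowT T B w2 w2)).set (y+h2) (rowB T B w2 w2) := by
  intro n
  induction n with
  | zero =>
    intro k hk
    have hkw : k = w2 := by omega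
    rw [hkw]
    rfl
  | succ n ih =>
    intro k hk
    rw [List.range'_succ, List.foldl_cons,
      pv_stepA_shape m y h2 w2 k T B hh (by omega) hyb hT hB]
    exact ih (k+1) (by omega)

theorem pv_inner_eq (m : List (List (List Int))) (y h2 w2 : Nat) (hh : h2 ≠ 0)
    (hyb : y + h2 < m.length)
    (hT : 2 * w2 ≤ (m.getD y []).length) (hB : 2 * w2 ≤ (m.getD (y+h2) []).length) :
    (List.range w2).foldl (fun m x => pvStepA h2 w2 m y x) m = pvStepBRow h2 w2 m y := by
  have hy : y < m.length := by omega
  set T := m.getD y [] with hTdef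
  set B := m.getD (y+h2) [] with hBdef
  have hm0 : m = (m.set y (rowT T B w2 0)).set (y+h2) (rowB T B w2 0) := by
    rw [rowT_zero, rowB_zero, hTdef, hBdef, pv_set_self m y [] hy,
      pv_set_self m (y+h2) [] hyb]
  have hfold := pv_inner_aux m y h2 w2 T B hh hyb hT hB w2 0 (by omega)
  have htop : (B.take (2*w2)).take w2 ++ (T.take (2*w2)).take w2 ++ T.drop (2*w2)
      = rowT T B w2 w2 := by
    unfold rowT
    rw [List.take_take, List.take_take]
    have : min w2 (2*w2) = w2 := by omega
    rw [this]
    have e : w2 + w2 = 2 * w2 := by omega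
    simp [e]
  have hbot : (B.take (2*w2)).drop w2 ++ (T.take (2*w2)).drop w2 ++ B.drop (2*w2)
      = rowB T B w2 w2 := by
    unfold rowB
    rw [List.drop_take, List.drop_take]
    have : 2*w2 - w2 = w2 := by omega
    rw [this]
    have e : w2 + w2 = 2 * w2 := by omega
    simp [e]
  calc (List.range w2).foldl (fun m x => pvStepA h2 w2 m y x) m
      = (List.range' 0 w2).foldl (fun m x => pvStepA h2 w2 m y x)
          ((m.set y (rowT T B w2 0)).set (y+h2) (rowB T B w2 0)) := by
        rw [← hm0, List.range_eq_range']
    _ = (m.set y (rowT T B w2 w2)).set (y+h2) (rowB T B w2 w2) := hfold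
    _ = pvStepBRow h2 w2 m y := by
        simp only [pvStepBRow]
        rw [← hTdef, ← hBdef, htop, hbot]

-- B's row step preserves the length of the matrix and of every row
theorem pv_stepB_len (m : List (List (List Int))) (y h2 w2 : Nat) (hh : h2 ≠ 0)
    (hyb : y + h2 < m.length)
    (hT : 2 * w2 ≤ (m.getD y []).length) (hB : 2 * w2 ≤ (m.getD (y+h2) []).length) :
    (pvStepBRow h2 w2 m y).length = m.length ∧
      ∀ i, ((pvStepBRow h2 w2 m y).getD i []).length = (m.getD i []).length := by
  have hy : y < m.length := by omega
  have hne : y ≠ y + h2 := by omega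
  refine ⟨by simp [pvStepBRow], ?_⟩
  intro i
  simp only [pvStepBRow]
  by_cases h1 : i = y + h2
  · subst h1
    rw [pv_getD_set_self _ _ _ _ (by simpa using hyb)]
    simp only [List.length_append, List.length_take, List.length_drop]
    omega
  · rw [pv_getD_set_ne _ _ _ _ _ (fun h => h1 h.symm)]
    by_cases h2' : i = y
    · subst h2'
      rw [pv_getD_set_self _ _ _ _ hy]
      simp only [List.length_append, List.length_take, List.length_drop]
      omega
    · rw [pv_getD_set_ne _ _ _ _ _ (fun h => h2' h.symm)]

-- outer loop
theorem pv_outer_eq (h2 w2 : Nat) (hh : h2 ≠ 0) :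
    ∀ (ys : List Nat) (m : List (List (List Int))),
      (∀ y ∈ ys, y + h2 < m.length ∧ 2 * w2 ≤ (m.getD y []).length ∧
        2 * w2 ≤ (m.getD (y+h2) []).length) →
      ys.foldl (fun m y => (List.range w2).foldl (fun m x => pvStepA h2 w2 m y x) m) m
        = ys.foldl (fun m y => pvStepBRow h2 w2 m y) m := by
  intro ys
  induction ys with
  | nil => intro m _; rfl
  | cons y0 t ih =>
    intro m hyp
    obtain ⟨h1, h2', h3⟩ := hyp y0 (List.mem_cons_self ..)
    simp only [List.foldl_cons]
    rw [pv_inner_eq m y0 h2 w2 hh h1 h2' h3]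
    apply ih
    intro y hy
    obtain ⟨hl, hr⟩ := pv_stepB_len m y0 h2 w2 hh h1 h2' h3
    obtain ⟨a1, a2, a3⟩ := hyp y (List.mem_cons_of_mem _ hy)
    exact ⟨by omega, by rw [hr]; exact a2, by rw [hr]; exact a3⟩

theorem rotate_quadrants_eq_alt (img_matrix : List (List (List Int)))
    (hpre : Pre_rotate_quadrants img_matrix) :
    rotate_quadrants img_matrix = rotate_quadrants_alt img_matrix := by
  obtain ⟨hne, hrows⟩ := hpre
  unfold rotate_quadrants rotate_quadrants_alt
  set h2 := img_matrix.length / 2 with hh2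
  set w2 := (img_matrix.headD []).length / 2 with hw2
  rcases Nat.eq_zero_or_pos h2 with hz | hpos
  · have hz' : img_matrix.length / 2 = 0 := by omega
    simp [hz', hz]
  · apply pv_outer_eq h2 w2 (by omega)
    intro y hy
    have hy' : y < h2 := List.mem_range.mp hy
    have hlen : 2 * h2 ≤ img_matrix.length := by omega
    exact ⟨by omega, hrows y (by omega), hrows (y + h2) (by omega)⟩

-- ===== VERDICT (by name: the statement is the Claim_ definition above) =====
theorem rotate_quadrants_spec : Claim_equal_rotate_quadrants := by
  intro img_matrix _ hpre
  unfold Spec_rotate_quadrants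
  exact rotate_quadrants_eq_alt img_matrix hpre
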